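-- pv_equiv track=rewrite | github.com/djcarvi/neuraudit-colombia | backend/apps/contratacion/management/commands/import_tarifarios_excel.py | _detectar_columnas_dispositivos
-- ===== SOURCE A (Python) =====
-- def _detectar_columnas_dispositivos(columnas):
--     """Detectar automáticamente las columnas para dispositivos"""
--     columnas_lower = [col.lower() for col in columnas]
--
--     mapeo = {}
--
--     # Detectar código INVIMA
--     for i, col in enumerate(columnas_lower):
--         if any(word in col for word in ['invima', 'codigo', 'registro']):
--             mapeo['codigo'] = columnas[i]
--             break
--
--     # Detectar nombre
--     for i, col in enumerate(columnas_lower):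
--         if any(word in col for word in ['nombre', 'comercial', 'dispositivo']):
--             mapeo['nombre'] = columnas[i]
--             break
--
--     # Detectar valores
--     for i, col in enumerate(columnas_lower):
--         if any(word in col for word in ['compra', 'costo']):
--             mapeo['valor_compra'] = columnas[i]
--         elif any(word in col for word in ['venta', 'precio', 'valor']):
--             mapeo['valor_venta'] = columnas[i]
--
--     return mapeo if 'codigo' in mapeo and 'nombre' in mapeo else None
-- ===== SOURCE B (Python) =====
-- def _detectar_columnas_dispositivos(columnas):
--     """Detectar automáticamente las columnas para dispositivos"""
--     codigo = None
--     nombre = None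
--     valores = {}
--     for col in columnas:
--         low = col.lower()
--         if codigo is None and any(w in low for w in ('invima', 'codigo', 'registro')):
--             codigo = col
--         if nombre is None and any(w in low for w in ('nombre', 'comercial', 'dispositivo')):
--             nombre = col
--         if any(w in low for w in ('compra', 'costo')):
--             valores['valor_compra'] = col
--         elif any(w in low for w in ('venta', 'precio', 'valor')):
--             valores['valor_venta'] = col
--     if codigo is None or nombre is None:
--         return None
--     return {'codigo': codigo, 'nombre': nombre, **valores}
-- ===== Notes on version B (the rewrite author's own statement) =====
-- stated objective: alternative
-- what changed: Replaces A's three separate scans over the column list (two break-loops and a third full pass, all writing into one dict) by a single fused pass with scalar first-wins accumulators for codigo/nombre and a small valores dict for the last-wins value columns, assembling the result dict once at the end.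
import Mathlib
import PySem

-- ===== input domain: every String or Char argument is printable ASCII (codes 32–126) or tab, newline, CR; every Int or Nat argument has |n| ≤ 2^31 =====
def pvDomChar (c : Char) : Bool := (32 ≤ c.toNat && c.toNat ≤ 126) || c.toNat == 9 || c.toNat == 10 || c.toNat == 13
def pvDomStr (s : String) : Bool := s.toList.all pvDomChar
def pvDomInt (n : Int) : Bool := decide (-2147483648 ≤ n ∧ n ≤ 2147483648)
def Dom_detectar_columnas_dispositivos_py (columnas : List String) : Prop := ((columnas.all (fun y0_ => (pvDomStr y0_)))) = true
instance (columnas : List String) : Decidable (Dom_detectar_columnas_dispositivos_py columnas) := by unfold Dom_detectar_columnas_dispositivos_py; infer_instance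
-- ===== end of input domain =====

-- B replaces A's three separate scans (two break-loops and a full valor pass, all mutating one
-- dict) by a single fused pass with first-wins scalar accumulators for codigo/nombre and a small
-- valores dict for the last-wins value columns, assembling the result dict once at the end.

-- ===== PORT A =====
-- any(word in col for word in words)
def pvAnyIn (words : List String) (col : String) : Bool :=
  words.any (fun w => PySem.Str.isIn w col)

-- 'for i, col in enumerate(columnas_lower): if any(...): mapeo[key] = columnas[i]; break'
-- as a recursion returning the first columnas[i] (break = stop at first match)
def pvFirstMatchA (columnas : List String) (words : List String) : List (Int × String) → Option String
  | [] => none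
  | (i, col) :: rest =>
    if pvAnyIn words col then some (PySem.List.pyGetD columnas i "")
    else pvFirstMatchA columnas words rest

-- body of A's third loop (last write wins, if/elif)
def pvValorStepA (columnas : List String) (d : PySem.Dict String String) (p : Int × String) : PySem.Dict String String :=
  if pvAnyIn ["compra", "costo"] p.2 then d.insert "valor_compra" (PySem.List.pyGetD columnas p.1 "")
  else if pvAnyIn ["venta", "precio", "valor"] p.2 then d.insert "valor_venta" (PySem.List.pyGetD columnas p.1 "")
  else d

def detectar_columnas_dispositivos_py (columnas : List String) : Option (List (String × String)) :=
  let columnas_lower := columnas.map PySem.Str.lower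
  let mapeo : PySem.Dict String String := PySem.Dict.empty
  let mapeo := match pvFirstMatchA columnas ["invima", "codigo", "registro"] (PySem.List.enumerate columnas_lower) with
    | some v => mapeo.insert "codigo" v
    | none => mapeo
  let mapeo := match pvFirstMatchA columnas ["nombre", "comercial", "dispositivo"] (PySem.List.enumerate columnas_lower) with
    | some v => mapeo.insert "nombre" v
    | none => mapeo
  let mapeo := (PySem.List.enumerate columnas_lower).foldl (pvValorStepA columnas) mapeo
  if mapeo.contains "codigo" && mapeo.contains "nombre" then some mapeo.items else none

-- ===== PORT B =====
-- one iteration of B's fused loop: state = (codigo, nombre, valores)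
def pvStepB (st : Option String × Option String × PySem.Dict String String) (col : String) :
    Option String × Option String × PySem.Dict String String :=
  let low := PySem.Str.lower col
  let codigo := if st.1.isNone && pvAnyIn ["invima", "codigo", "registro"] low then some col else st.1
  let nombre := if st.2.1.isNone && pvAnyIn ["nombre", "comercial", "dispositivo"] low then some col else st.2.1
  let valores := if pvAnyIn ["compra", "costo"] low then st.2.2.insert "valor_compra" col
    else if pvAnyIn ["venta", "precio", "valor"] low then st.2.2.insert "valor_venta" col
    else st.2.2
  (codigo, nombre, valores)

def detectar_columnas_dispositivos_py_alt (columnas : List String) : Option (List (String × String)) :=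
  let st := columnas.foldl pvStepB (none, none, PySem.Dict.empty)
  match st.1, st.2.1 with
  | some c, some n =>
      -- {'codigo': c, 'nombre': n, **valores}
      some ((st.2.2.items.foldl (fun d p => d.insert p.1 p.2)
              ((PySem.Dict.empty.insert "codigo" c).insert "nombre" n)).items)
  | _, _ => none

-- ===== PRECONDITION & SPEC =====
def Spec_detectar_columnas_dispositivos_py (columnas : List String) (out : Option (List (String × String))) : Prop := out = detectar_columnas_dispositivos_py_alt columnas
instance (columnas : List String) (out : Option (List (String × String))) : Decidable (Spec_detectar_columnas_dispositivos_py columnas out) := by unfold Spec_detectar_columnas_dispositivos_py; infer_instance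

-- ===== CLAIM (what is proved, stated in full; the proofs are below) =====
def Claim_equal_detectar_columnas_dispositivos_py : Prop := ∀ (columnas : List String), Dom_detectar_columnas_dispositivos_py columnas → Spec_detectar_columnas_dispositivos_py columnas (detectar_columnas_dispositivos_py columnas)

-- ===== LEMMAS AND PROOFS =====

-- the three components of B's fused fold, taken separately
def pvStepC (words : List String) (a : Option String) (col : String) : Option String :=
  if a.isNone && pvAnyIn words (PySem.Str.lower col) then some col else a

def pvStepV (d : PySem.Dict String String) (col : String) : PySem.Dict String String :=
  if pvAnyIn ["compra", "costo"] (PySem.Str.lower col) then d.insert "valor_compra" col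
  else if pvAnyIn ["venta", "precio", "valor"] (PySem.Str.lower col) then d.insert "valor_venta" col
  else d

theorem pvStepB_decompose (cs : List String) : ∀ (a b : Option String) (d : PySem.Dict String String),
    cs.foldl pvStepB (a, b, d) =
      (cs.foldl (pvStepC ["invima", "codigo", "registro"]) a,
       cs.foldl (pvStepC ["nombre", "comercial", "dispositivo"]) b,
       cs.foldl pvStepV d) := by
  induction cs with
  | nil => intro a b d; rfl
  | cons c cs ih => intro a b d; rw [List.foldl_cons, List.foldl_cons, List.foldl_cons, List.foldl_cons]; exact ih _ _ _

theorem pvStepC_some (cs : List String) (ws : List String) (x : String) :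
    cs.foldl (pvStepC ws) (some x) = some x := by
  induction cs with
  | nil => rfl
  | cons c cs ih => simp [List.foldl_cons, pvStepC, ih]

theorem pvFirstMatchA_eq (cs : List String) : ∀ (pre : List String) (words : List String),
    pvFirstMatchA (pre ++ cs) words (PySem.List.enumerate (cs.map PySem.Str.lower) (pre.length : Int)) =
      cs.foldl (pvStepC words) none := by
  induction cs with
  | nil => intro pre words; simp [pvFirstMatchA, PySem.List.enumerate_nil]
  | cons c cs ih =>
    intro pre words
    rw [List.map_cons, PySem.List.enumerate_cons, List.foldl_cons]
    by_cases h : pvAnyIn words (PySem.Str.lower c)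
    · simp [pvFirstMatchA, pvStepC, h, pvStepC_some]
    · simp only [pvFirstMatchA, h, if_neg, Bool.false_eq_true, not_false_iff, pvStepC,
        Option.isNone_none, Bool.true_and]
      have hlen : ((pre.length : Int) + 1) = (((pre ++ [c]).length : Int)) := by simp
      have happ : pre ++ c :: cs = (pre ++ [c]) ++ cs := by simp
      rw [hlen, happ, ih (pre ++ [c]) words]

theorem pvFoldA_eq (cs : List String) : ∀ (pre : List String) (d : PySem.Dict String String),
    (PySem.List.enumerate (cs.map PySem.Str.lower) (pre.length : Int)).foldl (pvValorStepA (pre ++ cs)) d =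
      cs.foldl pvStepV d := by
  induction cs with
  | nil => intro pre d; simp [PySem.List.enumerate_nil]
  | cons c cs ih =>
    intro pre d
    rw [List.map_cons, PySem.List.enumerate_cons, List.foldl_cons, List.foldl_cons]
    have hstep : pvValorStepA (pre ++ c :: cs) d ((pre.length : Int), PySem.Str.lower c) =
        pvStepV d c := by
      simp [pvValorStepA, pvStepV]
    rw [hstep]
    have hlen : ((pre.length : Int) + 1) = (((pre ++ [c]).length : Int)) := by simp
    have happ : pre ++ c :: cs = (pre ++ [c]) ++ cs := by simp
    rw [hlen, happ, ih (pre ++ [c])]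

theorem pvFoldV_contains (cs : List String) : ∀ (d : PySem.Dict String String) (k : String),
    k ≠ "valor_compra" → k ≠ "valor_venta" →
    (cs.foldl pvStepV d).contains k = d.contains k := by
  induction cs with
  | nil => intro d k _ _; rfl
  | cons c cs ih =>
    intro d k h1 h2
    rw [List.foldl_cons, ih _ k h1 h2]
    unfold pvStepV
    split_ifs <;> simp [PySem.Dict.contains_insert, h1, h2]

-- inserting a key absent from d0 into a dict whose items are d0.items ++ v.items acts inside v
theorem pvInsert_merge (d0 v D : PySem.Dict String String) (k x : String)
    (hk : d0.contains k = false) (hD : D.items = d0.items ++ v.items) :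
    (D.insert k x).items = d0.items ++ (v.insert k x).items := by
  have hkeys : k ∉ d0.keys := by
    intro hmem
    have := (PySem.Dict.contains_iff_mem_keys d0 k).2 hmem
    rw [hk] at this; exact Bool.false_ne_true this
  have hd0 : ∀ p ∈ d0.items, (p.1 == k) = false := by
    intro p hp
    have hpk := PySem.Dict.mem_keys_of_mem_items d0 hp
    simp only [beq_eq_false_iff_ne, ne_eq]
    intro h; rw [h] at hpk; exact hkeys hpk
  have hcont : D.contains k = v.contains k := by
    rw [PySem.Dict.contains_eq_decide_mem_keys, PySem.Dict.contains_eq_decide_mem_keys]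
    have hkeq : D.keys = d0.keys ++ v.keys := by
      simp only [PySem.Dict.keys, hD, List.map_append]
    rw [hkeq]
    simp [List.mem_append, hkeys]
  by_cases hv : v.contains k = true
  · rw [PySem.Dict.items_insert_of_contains D x (by rw [hcont]; exact hv), hD,
        List.map_append, PySem.Dict.items_insert_of_contains v x hv]
    congr 1
    exact (List.map_congr_left (fun p hp => by simp [hd0 p hp])).trans (List.map_id d0.items)
  · rw [PySem.Dict.items_insert_of_not_contains D x (by rw [hcont]; simpa using hv), hD,
        PySem.Dict.items_insert_of_not_contains v x (by simpa using hv), List.append_assoc]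

theorem pvFoldV_merge (cs : List String) : ∀ (d0 v D : PySem.Dict String String),
    d0.contains "valor_compra" = false → d0.contains "valor_venta" = false →
    D.items = d0.items ++ v.items →
    (cs.foldl pvStepV D).items = d0.items ++ (cs.foldl pvStepV v).items := by
  induction cs with
  | nil => intro d0 v D _ _ hD; simpa using hD
  | cons c cs ih =>
    intro d0 v D h1 h2 hD
    rw [List.foldl_cons, List.foldl_cons]
    unfold pvStepV
    split_ifs with hc hv
    · exact ih d0 _ _ h1 h2 (pvInsert_merge d0 v D _ c h1 hD)
    · exact ih d0 _ _ h1 h2 (pvInsert_merge d0 v D _ c h2 hD)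
    · exact ih d0 _ _ h1 h2 hD

-- B's final merge of the small valores dict appends its items after d0's
theorem pvMergeB_items (ps : List (String × String)) : ∀ (d0 v D : PySem.Dict String String),
    d0.contains "valor_compra" = false → d0.contains "valor_venta" = false →
    (∀ p ∈ ps, p.1 = "valor_compra" ∨ p.1 = "valor_venta") →
    D.items = d0.items ++ v.items →
    (ps.foldl (fun d p => d.insert p.1 p.2) D).items =
      d0.items ++ (ps.foldl (fun d p => d.insert p.1 p.2) v).items := by
  induction ps with
  | nil => intro d0 v D _ _ _ hD; simpa using hD
  | cons p ps ih =>
    intro d0 v D h1 h2 hps hD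
    rw [List.foldl_cons, List.foldl_cons]
    have hk : d0.contains p.1 = false := by
      rcases hps p (List.mem_cons_self) with h | h <;> rw [h] <;> assumption
    exact ih d0 _ _ h1 h2 (fun q hq => hps q (List.mem_cons_of_mem _ hq))
      (pvInsert_merge d0 v D p.1 p.2 hk hD)

-- every key of the valores accumulator is one of the two valor keys, and the keys stay nodup
theorem pvFoldV_keys (cs : List String) : ∀ (v : PySem.Dict String String),
    (∀ k ∈ v.keys, k = "valor_compra" ∨ k = "valor_venta") →
    ∀ k ∈ (cs.foldl pvStepV v).keys, k = "valor_compra" ∨ k = "valor_venta" := by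
  induction cs with
  | nil => intro v hv; exact hv
  | cons c cs ih =>
    intro v hv
    rw [List.foldl_cons]
    apply ih
    unfold pvStepV
    split_ifs <;> intro k hk
    · rcases (PySem.Dict.mem_keys_insert _ _ _ _).1 hk with h | h
      · exact Or.inl h
      · exact hv k h
    · rcases (PySem.Dict.mem_keys_insert _ _ _ _).1 hk with h | h
      · exact Or.inr h
      · exact hv k h
    · exact hv k hk

theorem pvFoldV_nodup (cs : List String) : ∀ (v : PySem.Dict String String),
    v.keys.Nodup → (cs.foldl pvStepV v).keys.Nodup := by
  induction cs with
  | nil => intro v hv; exact hv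
  | cons c cs ih =>
    intro v hv
    rw [List.foldl_cons]
    apply ih
    unfold pvStepV
    split_ifs
    · exact PySem.Dict.nodup_keys_insert _ _ _ hv
    · exact PySem.Dict.nodup_keys_insert _ _ _ hv
    · exact hv

-- ===== VERDICT (by name: the statement is the Claim_ definition above) =====
theorem detectar_columnas_dispositivos_py_spec : Claim_equal_detectar_columnas_dispositivos_py := by
  intro columnas _
  unfold Spec_detectar_columnas_dispositivos_py
  unfold detectar_columnas_dispositivos_py detectar_columnas_dispositivos_py_alt
  have h1 := pvFirstMatchA_eq columnas [] ["invima", "codigo", "registro"]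
  have h2 := pvFirstMatchA_eq columnas [] ["nombre", "comercial", "dispositivo"]
  have h3 := fun d => pvFoldA_eq columnas [] d
  simp only [List.nil_append, List.length_nil, Nat.cast_zero] at h1 h2 h3
  dsimp only
  rw [h1, h2, pvStepB_decompose]
  dsimp only
  cases hc : columnas.foldl (pvStepC ["invima", "codigo", "registro"]) none with
  | none =>
    cases hn : columnas.foldl (pvStepC ["nombre", "comercial", "dispositivo"]) none with
    | none =>
      simp only [h3]
      rw [pvFoldV_contains _ _ "codigo" (by decide) (by decide)]
      simp
    | some n =>
      simp only [h3]
      rw [pvFoldV_contains _ _ "codigo" (by decide) (by decide)]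
      simp [PySem.Dict.contains_insert]
  | some c =>
    cases hn : columnas.foldl (pvStepC ["nombre", "comercial", "dispositivo"]) none with
    | none =>
      simp only [h3]
      rw [pvFoldV_contains _ _ "nombre" (by decide) (by decide)]
      simp [PySem.Dict.contains_insert]
    | some n =>
      simp only [h3]
      rw [pvFoldV_contains _ _ "codigo" (by decide) (by decide),
          pvFoldV_contains _ _ "nombre" (by decide) (by decide)]
      have hd0c : ((PySem.Dict.empty.insert "codigo" c).insert "nombre" n).contains "valor_compra" = false := by
        simp [PySem.Dict.contains_insert, PySem.Dict.contains_empty]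
      have hd0v : ((PySem.Dict.empty.insert "codigo" c).insert "nombre" n).contains "valor_venta" = false := by
        simp [PySem.Dict.contains_insert, PySem.Dict.contains_empty]
      have hA := pvFoldV_merge columnas ((PySem.Dict.empty.insert "codigo" c).insert "nombre" n)
        PySem.Dict.empty ((PySem.Dict.empty.insert "codigo" c).insert "nombre" n) hd0c hd0v (by simp [PySem.Dict.empty])
      have hkeys := pvFoldV_keys columnas PySem.Dict.empty
        (by simp [PySem.Dict.keys, PySem.Dict.empty])
      have hnd := pvFoldV_nodup columnas PySem.Dict.empty PySem.Dict.nodup_keys_empty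
      have hB := pvMergeB_items (columnas.foldl pvStepV PySem.Dict.empty).items
        ((PySem.Dict.empty.insert "codigo" c).insert "nombre" n) PySem.Dict.empty
        ((PySem.Dict.empty.insert "codigo" c).insert "nombre" n) hd0c hd0v
        (fun p hp => hkeys p.1 (PySem.Dict.mem_keys_of_mem_items _ hp)) (by simp [PySem.Dict.empty])
      have hfresh := PySem.Dict.items_foldl_insert_fresh
        (columnas.foldl pvStepV PySem.Dict.empty).items Prod.fst Prod.snd
        (PySem.Dict.empty : PySem.Dict String String)
        (fun a _ => PySem.Dict.contains_empty _) (by simpa [PySem.Dict.keys] using hnd)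
      simp only [PySem.Dict.contains_insert, PySem.Dict.contains_empty] at *
      simp only [hA, hB, hfresh]
      simp [PySem.Dict.empty]
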